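-- pv_equiv track=rewrite | github.com/PossumXI/Immaculate | benchmarks/harbor/q_harbor_agent.py | _normalize_route
-- ===== SOURCE A (Python) =====
-- def _normalize_route(value: str | None) -> str | None:
--     candidate = " ".join(str(value or "").strip().lower().split())
--     if candidate in {"reflex", "cognitive", "guarded", "suppressed"}:
--         return candidate
--     for route in ("guarded", "suppressed", "cognitive", "reflex"):
--         if route in candidate:
--             return route
--     if "guard" in candidate:
--         return "guarded"
--     if "suppress" in candidate or "block" in candidate:
--         return "suppressed"
--     if "cognit" in candidate or "repair" in candidate or "stabil" in candidate:
--         return "cognitive"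
--     if "direct" in candidate:
--         return "reflex"
--     return None
-- ===== SOURCE B (Python) =====
-- _PATTERNS = ["guarded", "suppressed", "cognitive", "reflex",
--              "guard",
--              "suppress", "block",
--              "cognit", "repair", "stabil",
--              "direct"]
-- _ROUTES = ["guarded", "suppressed", "cognitive", "reflex",
--            "guarded",
--            "suppressed", "suppressed",
--            "cognitive", "cognitive", "cognitive",
--            "reflex"]
--
--
-- def _rank_at(s, i):
--     for rank, pattern in enumerate(_PATTERNS):
--         if s.startswith(pattern, i):
--             return rank
--     return None
--
--
-- def _normalize_route(value):
--     candidate = " ".join(str(value or "").strip().lower().split())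
--     best = None
--     for i in range(len(candidate) + 1):
--         rank = _rank_at(candidate, i)
--         if rank is not None and (best is None or rank < best):
--             best = rank
--     return _ROUTES[best] if best is not None else None
-- ===== Notes on version B (the rewrite author's own statement) =====
-- stated objective: alternative
-- what changed: Instead of A's per-keyword substring searches (exact-match set, word loop, prefix if-chain), B makes a single left-to-right scan over the normalized candidate, computing at each position the first keyword anchored there and keeping the minimum keyword rank, then maps the best rank to its route.
import Mathlib
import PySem

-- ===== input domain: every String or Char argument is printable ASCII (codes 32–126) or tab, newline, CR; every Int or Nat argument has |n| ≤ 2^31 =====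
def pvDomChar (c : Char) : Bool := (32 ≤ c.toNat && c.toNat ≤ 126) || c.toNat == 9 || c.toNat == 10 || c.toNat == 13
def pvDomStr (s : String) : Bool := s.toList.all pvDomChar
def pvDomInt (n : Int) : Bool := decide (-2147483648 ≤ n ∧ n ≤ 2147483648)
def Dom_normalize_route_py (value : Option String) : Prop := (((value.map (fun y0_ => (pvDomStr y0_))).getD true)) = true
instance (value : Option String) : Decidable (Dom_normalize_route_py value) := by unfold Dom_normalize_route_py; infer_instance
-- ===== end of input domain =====

-- B replaces A's per-keyword substring searches (exact-match set, word loop, prefix if-chain) by a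
-- single left-to-right scan over the candidate keeping the best (lowest) matching keyword rank;
-- objective: alternative (not claimed faster).


-- ===== PORT A =====
def normalize_route_py (value : Option String) : Option String :=
  let candidate := PySem.Str.join " "
    (PySem.Str.split₀ (PySem.Str.lower (PySem.Str.strip (value.getD ""))))
  if candidate = "reflex" ∨ candidate = "cognitive" ∨ candidate = "guarded" ∨ candidate = "suppressed" then
    some candidate
  else
    match ["guarded", "suppressed", "cognitive", "reflex"].find?
        (fun route => PySem.Str.isIn route candidate) with
    | some route => some route
    | none =>
      if PySem.Str.isIn "guard" candidate then some "guarded"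
      else if PySem.Str.isIn "suppress" candidate || PySem.Str.isIn "block" candidate then some "suppressed"
      else if PySem.Str.isIn "cognit" candidate || PySem.Str.isIn "repair" candidate || PySem.Str.isIn "stabil" candidate then some "cognitive"
      else if PySem.Str.isIn "direct" candidate then some "reflex"
      else none

-- ===== PORT B =====
def pvPatterns : List String :=
  ["guarded", "suppressed", "cognitive", "reflex",
   "guard",
   "suppress", "block",
   "cognit", "repair", "stabil",
   "direct"]

def pvRoutes : List String :=
  ["guarded", "suppressed", "cognitive", "reflex",
   "guarded",
   "suppressed", "suppressed",
   "cognitive", "cognitive", "cognitive",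
   "reflex"]

-- _rank_at: the enumerate/return-first loop is List.findIdx?; s.startswith(pattern, i) with
-- 0 ≤ i ≤ len(s) is exactly pattern.toList.isPrefixOf (cs.drop i) (exact on that range).
def pvRankAt (cs : List Char) (i : Nat) : Option Nat :=
  pvPatterns.findIdx? (fun pat => pat.toList.isPrefixOf (cs.drop i))

def normalize_route_py_alt (value : Option String) : Option String :=
  let candidate := PySem.Str.join " "
    (PySem.Str.split₀ (PySem.Str.lower (PySem.Str.strip (value.getD ""))))
  let cs := candidate.toList
  let best := (List.range (cs.length + 1)).foldl
    (fun b i =>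
      match pvRankAt cs i with
      | none => b
      | some r =>
        match b with
        | none => some r
        | some m => if r < m then some r else some m) none
  -- _ROUTES[best] (best is always < 11 here, so the Python indexing never raises)
  match best with
  | none => none
  | some r => pvRoutes[r]?

-- ===== PRECONDITION & SPEC =====
def Spec_normalize_route_py (value : Option String) (out : Option String) : Prop := out = normalize_route_py_alt value
instance (value : Option String) (out : Option String) : Decidable (Spec_normalize_route_py value out) := by unfold Spec_normalize_route_py; infer_instance

-- ===== CLAIM (what is proved, stated in full; the proofs are below) =====
def Claim_equal_normalize_route_py : Prop := ∀ (value : Option String), Dom_normalize_route_py value → Spec_normalize_route_py value (normalize_route_py value)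

-- ===== LEMMAS AND PROOFS =====

/-- option-min: the accumulator update of B's scan. -/
def pvOmin (a b : Option Nat) : Option Nat :=
  match a, b with
  | none, b => b
  | a, none => a
  | some x, some y => some (min x y)

theorem pvOmin_none (a : Option Nat) : pvOmin a none = a := by
  cases a <;> rfl

theorem pvOmin_assoc (a b c : Option Nat) : pvOmin (pvOmin a b) c = pvOmin a (pvOmin b c) := by
  cases a <;> cases b <;> cases c <;> simp [pvOmin, Nat.min_assoc]

/-- B's inner-step equals option-min with the rank at the position. -/
theorem pvStep_eq (cs : List Char) (b : Option Nat) (i : Nat) :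
    (match pvRankAt cs i with
     | none => b
     | some r =>
       match b with
       | none => some r
       | some m => if r < m then some r else some m) = pvOmin b (pvRankAt cs i) := by
  cases h : pvRankAt cs i <;> cases b <;> simp only [pvOmin] <;>
    first
    | rfl
    | (rename_i r m; rw [Nat.min_def]; split_ifs <;> first | rfl | (exfalso; omega))

/-- findIdx? distributes first-match over disjunction as an option-min. -/
theorem findIdx?_or {α : Type} (l : List α) (p q : α → Bool) :
    pvOmin (l.findIdx? p) (l.findIdx? q) = l.findIdx? (fun a => p a || q a) := by
  induction l with
  | nil => rfl
  | cons a l ih =>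
    by_cases hp : p a = true <;> by_cases hq : q a = true <;>
      simp [List.findIdx?_cons, hp, hq, ← ih] <;>
      cases l.findIdx? p <;> cases l.findIdx? q <;> simp [pvOmin]

theorem findIdx?_false {α : Type} (l : List α) : l.findIdx? (fun _ => false) = none := by
  induction l <;> simp_all [List.findIdx?_cons]

/-- The outer fold over positions computes the first pattern matching at any listed position. -/
theorem pvFold_eq (cs : List Char) (L : List Nat) (b : Option Nat) :
    L.foldl (fun b i =>
      match pvRankAt cs i with
      | none => b
      | some r =>
        match b with
        | none => some r
        | some m => if r < m then some r else some m) b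
    = pvOmin b (pvPatterns.findIdx? (fun pat => L.any (fun i => pat.toList.isPrefixOf (cs.drop i)))) := by
  induction L generalizing b with
  | nil =>
    simp only [List.foldl_nil, List.any_nil]
    rw [findIdx?_false, pvOmin_none]
  | cons i L ih =>
    rw [List.foldl_cons, pvStep_eq, ih, pvOmin_assoc]
    congr 1
    have : (fun pat : String => (i :: L).any (fun j => pat.toList.isPrefixOf (cs.drop j)))
        = fun pat => pat.toList.isPrefixOf (cs.drop i) || L.any (fun j => pat.toList.isPrefixOf (cs.drop j)) := by
      funext pat; simp
    rw [this, ← findIdx?_or]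
    rfl

/-- Matching at some position of range (n+1) is substring membership. -/
theorem pvAny_range_eq_isIn (cs : List Char) (pat : List Char) :
    (List.range (cs.length + 1)).any (fun i => pat.isPrefixOf (cs.drop i)) = PySem.Chars.isIn pat cs := by
  rcases h : PySem.Chars.isIn pat cs with _ | _
  · rw [List.any_eq_false]
    intro i _
    simp only [Bool.not_eq_true, List.isPrefixOf_iff_prefix]
    intro hpre
    have : ∃ j, pat <+: cs.drop j := ⟨i, hpre⟩
    rw [PySem.Chars.exists_prefix_drop_iff_isIn] at this
    simp [this] at h
  · rw [List.any_eq_true]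
    obtain ⟨j, hj⟩ := (PySem.Chars.exists_prefix_drop_iff_isIn pat cs).mpr h
    by_cases hle : j ≤ cs.length
    · exact ⟨j, by simp [List.mem_range]; omega, by simpa [List.isPrefixOf_iff_prefix] using hj⟩
    · refine ⟨cs.length, by simp, ?_⟩
      rw [List.isPrefixOf_iff_prefix, List.drop_length]
      rwa [List.drop_eq_nil_of_le (by omega)] at hj

/-- The core equivalence, on the normalized candidate string. -/
theorem pvKey (c : String) :
    (if c = "reflex" ∨ c = "cognitive" ∨ c = "guarded" ∨ c = "suppressed" then
      some c
    else
      match ["guarded", "suppressed", "cognitive", "reflex"].find?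
          (fun route => PySem.Str.isIn route c) with
      | some route => some route
      | none =>
        if PySem.Str.isIn "guard" c then some "guarded"
        else if PySem.Str.isIn "suppress" c || PySem.Str.isIn "block" c then some "suppressed"
        else if PySem.Str.isIn "cognit" c || PySem.Str.isIn "repair" c || PySem.Str.isIn "stabil" c then some "cognitive"
        else if PySem.Str.isIn "direct" c then some "reflex"
        else none)
    = (match (List.range (c.toList.length + 1)).foldl
        (fun b i =>
          match pvRankAt c.toList i with
          | none => b
          | some r =>
            match b with
            | none => some r
            | some m => if r < m then some r else some m) none with
      | none => none
      | some r => pvRoutes[r]?) := by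
  by_cases h1 : c = "reflex"
  · subst h1; decide
  by_cases h2 : c = "cognitive"
  · subst h2; decide
  by_cases h3 : c = "guarded"
  · subst h3; decide
  by_cases h4 : c = "suppressed"
  · subst h4; decide
  rw [pvFold_eq]
  have hany : (fun pat : String =>
      (List.range (c.toList.length + 1)).any (fun i => pat.toList.isPrefixOf (c.toList.drop i)))
      = fun pat => PySem.Chars.isIn pat.toList c.toList := by
    funext pat; exact pvAny_range_eq_isIn c.toList pat.toList
  rw [hany]
  simp only [h1, h2, h3, h4, or_self, if_false, pvOmin]
  by_cases g0 : PySem.Chars.isIn ['g','u','a','r','d','e','d'] c.toList = true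
  · simp [pvPatterns, List.findIdx?_cons, g0, List.find?, pvRoutes]
  by_cases g1 : PySem.Chars.isIn ['s','u','p','p','r','e','s','s','e','d'] c.toList = true
  · simp [pvPatterns, List.findIdx?_cons, g0, g1, List.find?, pvRoutes]
  by_cases g2 : PySem.Chars.isIn ['c','o','g','n','i','t','i','v','e'] c.toList = true
  · simp [pvPatterns, List.findIdx?_cons, g0, g1, g2, List.find?, pvRoutes]
  by_cases g3 : PySem.Chars.isIn ['r','e','f','l','e','x'] c.toList = true
  · simp [pvPatterns, List.findIdx?_cons, g0, g1, g2, g3, List.find?, pvRoutes]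
  by_cases g4 : PySem.Chars.isIn ['g','u','a','r','d'] c.toList = true
  · simp [pvPatterns, List.findIdx?_cons, g0, g1, g2, g3, g4, List.find?, pvRoutes]
  by_cases g5 : PySem.Chars.isIn ['s','u','p','p','r','e','s','s'] c.toList = true
  · simp [pvPatterns, List.findIdx?_cons, g0, g1, g2, g3, g4, g5, List.find?, pvRoutes]
  by_cases g6 : PySem.Chars.isIn ['b','l','o','c','k'] c.toList = true
  · simp [pvPatterns, List.findIdx?_cons, g0, g1, g2, g3, g4, g5, g6, List.find?, pvRoutes]
  by_cases g7 : PySem.Chars.isIn ['c','o','g','n','i','t'] c.toList = true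
  · simp [pvPatterns, List.findIdx?_cons, g0, g1, g2, g3, g4, g5, g6, g7, List.find?, pvRoutes]
  by_cases g8 : PySem.Chars.isIn ['r','e','p','a','i','r'] c.toList = true
  · simp [pvPatterns, List.findIdx?_cons, g0, g1, g2, g3, g4, g5, g6, g7, g8, List.find?, pvRoutes]
  by_cases g9 : PySem.Chars.isIn ['s','t','a','b','i','l'] c.toList = true
  · simp [pvPatterns, List.findIdx?_cons, g0, g1, g2, g3, g4, g5, g6, g7, g8, g9, List.find?, pvRoutes]
  by_cases g10 : PySem.Chars.isIn ['d','i','r','e','c','t'] c.toList = true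
  · simp [pvPatterns, List.findIdx?_cons, g0, g1, g2, g3, g4, g5, g6, g7, g8, g9, g10, List.find?, pvRoutes]
  · simp [pvPatterns, List.findIdx?_cons, g0, g1, g2, g3, g4, g5, g6, g7, g8, g9, g10, List.find?, pvRoutes]

-- ===== VERDICT (by name: the statement is the Claim_ definition above) =====
theorem normalize_route_py_spec : Claim_equal_normalize_route_py := by
  intro value _
  unfold Spec_normalize_route_py normalize_route_py normalize_route_py_alt
  generalize (PySem.Str.join " "
    (PySem.Str.split₀ (PySem.Str.lower (PySem.Str.strip (value.getD ""))))) = c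
  exact pvKey c
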